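-- pv_equiv track=rewrite | github.com/TilenKelc/vaje_10_UvR | covid19.py | zlati_prinasalec
-- ===== SOURCE A (Python) =====
-- def okuzeni(skupine, nosilci):
--     okuzeni = []
--     if len(nosilci) == 0:
--         return set(okuzeni)
--     for skupina in skupine:
--
--         for nosilec in nosilci:
--             if nosilec in skupina:
--                 okuzeni += skupina
--
--     return set(okuzeni).difference(nosilci)
--
-- def zlati_prinasalec(skupine):
--     max = 0
--
--     dictoseb = {}
--
--     sett = set()
--     for skupina in skupine:
--         sett.update(skupina)
--
--     for oseba in sett:
--         okuzeniii = okuzeni(skupine, [oseba])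
--         st_okuzenih = len(okuzeniii)
--
--         if st_okuzenih >= max:
--             max = st_okuzenih
--             dictoseb[oseba] = st_okuzenih
--
--     najosebe = []
--     maks = 0
--
--     for oseba, st_okuz in dictoseb.items():
--         if st_okuz >= maks:
--             maks = st_okuz
--
--     for oseba, st_okuz in dictoseb.items():
--         if st_okuz == maks:
--             najosebe.append(oseba)
--
--     najosebe.sort()
--     return najosebe[0]
-- ===== SOURCE B (Python) =====
-- def zlati_prinasalec(skupine):
--     sets = [set(g) for g in skupine]
--     clanstvo = {}
--     for i, s in enumerate(sets):
--         for oseba in s: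
--             clanstvo.setdefault(oseba, []).append(i)
--     stevila = {oseba: len(set().union(*(sets[i] for i in idxs))) - 1
--                for oseba, idxs in clanstvo.items()}
--     maks = max(stevila.values())
--     return min(o for o, c in stevila.items() if c == maks)
-- ===== Notes on version B (the rewrite author's own statement) =====
-- stated objective: faster
-- what changed: Instead of rescanning every group for every person (helper okuzeni) plus a running-max dict pass and a sort, B deduplicates each group once, builds a person->group-indices index in one pass, computes each person's infected set as a single union of only the groups containing them, and returns the minimum person among those with the maximal count.
import Mathlib
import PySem

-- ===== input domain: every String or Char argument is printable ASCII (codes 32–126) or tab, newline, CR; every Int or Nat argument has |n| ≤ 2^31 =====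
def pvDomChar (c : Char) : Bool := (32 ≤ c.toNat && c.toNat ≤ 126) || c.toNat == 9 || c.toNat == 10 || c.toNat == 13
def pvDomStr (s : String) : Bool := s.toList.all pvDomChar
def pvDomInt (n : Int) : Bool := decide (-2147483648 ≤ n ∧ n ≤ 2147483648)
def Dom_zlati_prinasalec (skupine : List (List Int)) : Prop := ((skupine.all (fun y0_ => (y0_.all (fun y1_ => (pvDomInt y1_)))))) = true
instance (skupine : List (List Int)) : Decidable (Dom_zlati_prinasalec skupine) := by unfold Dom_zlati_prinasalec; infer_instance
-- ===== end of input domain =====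

-- B replaces A's per-person rescan of all groups by a one-pass person → infected-set index
-- and then takes the minimum person among those of maximal set size (objective: faster).

-- ===== PORT A =====
def okuzeniA (skupine : List (List Int)) (nosilci : List Int) : PySem.Set Int :=
  if nosilci.length = 0 then PySem.Set.ofList ([] : List Int)
  else
    let ok : List Int := skupine.foldl (fun acc skupina =>
      nosilci.foldl (fun acc nosilec =>
        if skupina.contains nosilec then acc ++ skupina else acc) acc) []
    PySem.Set.diff (PySem.Set.ofList ok) nosilci

def zlati_prinasalec (skupine : List (List Int)) : Int :=
  let sett : PySem.Set Int :=
    skupine.foldl (fun s skupina => PySem.Set.update s skupina) PySem.Set.empty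
  let st : Int × PySem.Dict Int Int :=
    sett.foldl (fun st oseba =>
      let st_okuzenih : Int := PySem.Set.len (okuzeniA skupine [oseba])
      if st_okuzenih ≥ st.1 then (st_okuzenih, st.2.insert oseba st_okuzenih) else st)
      ((0 : Int), PySem.Dict.empty)
  let maks : Int := st.2.items.foldl (fun m kv => if kv.2 ≥ m then kv.2 else m) 0
  let najosebe : List Int :=
    st.2.items.foldl (fun l kv => if kv.2 = maks then l ++ [kv.1] else l) []
  (PySem.List.pyGet? (PySem.List.sorted najosebe (fun x => x) false) 0).getD 0

-- ===== PORT B =====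
def zlati_prinasalec_alt (skupine : List (List Int)) : Int :=
  let sets : List (PySem.Set Int) := skupine.map (fun g => PySem.Set.ofList g)
  let clanstvo : PySem.Dict Int (List Int) :=
    (PySem.List.enumerate sets).foldl (fun d is =>
      is.2.foldl (fun d oseba => d.modify oseba [] (fun l => l ++ [is.1])) d) PySem.Dict.empty
  let stevila : PySem.Dict Int Int :=
    clanstvo.items.foldl (fun d kv =>
      d.insert kv.1
        (PySem.Set.len (kv.2.foldl (fun acc i =>
            PySem.Set.union acc ((PySem.List.pyGet? sets i).getD PySem.Set.empty)) PySem.Set.empty) - 1))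
      PySem.Dict.empty
  let maks : Int := (PySem.List.max? stevila.values (fun v => v)).getD 0
  (PySem.List.min? (stevila.items.filterMap (fun kv : Int × Int =>
      if kv.2 = maks then some kv.1 else none)) (fun v => v)).getD 0

-- ===== PRECONDITION & SPEC =====
-- Pre_ excludes exactly the inputs with no person at all (all groups empty): there A raises
-- IndexError (najosebe[0] on []) and B raises ValueError (max() of an empty sequence).
def Pre_zlati_prinasalec (skupine : List (List Int)) : Prop := skupine.flatten ≠ []
instance (skupine : List (List Int)) : Decidable (Pre_zlati_prinasalec skupine) := by
  unfold Pre_zlati_prinasalec; infer_instance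

def pvWitness_zlati_prinasalec : List (List Int) := [[1, 2], [2, 3], [4]]

def Spec_zlati_prinasalec (skupine : List (List Int)) (out : Int) : Prop := out = zlati_prinasalec_alt skupine
instance (skupine : List (List Int)) (out : Int) : Decidable (Spec_zlati_prinasalec skupine out) := by unfold Spec_zlati_prinasalec; infer_instance

-- ===== CLAIM (what is proved, stated in full; the proofs are below) =====
def Claim_equal_zlati_prinasalec : Prop := ∀ (skupine : List (List Int)), Dom_zlati_prinasalec skupine → Pre_zlati_prinasalec skupine → Spec_zlati_prinasalec skupine (zlati_prinasalec skupine)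

-- ===== LEMMAS AND PROOFS =====

-- the distinct persons, in first-occurrence order
def pvP (sk : List (List Int)) : List Int := PySem.Set.ofList sk.flatten
-- the union of the groups containing p (p's own infection closure, p included)
def pvU (sk : List (List Int)) (p : Int) : PySem.Set Int :=
  PySem.Set.ofList ((sk.filter (fun g => g.contains p)).flatten)
-- the number of people p infects (p itself removed)
def pvC (sk : List (List Int)) (p : Int) : Int :=
  PySem.Set.len (PySem.Set.diff (pvU sk p) [p])
-- the maximal infection count
def pvM (sk : List (List Int)) : Int := ((pvP sk).map (pvC sk)).foldl max 0
-- the persons achieving it, in first-occurrence order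
def pvF (sk : List (List Int)) : List Int :=
  (pvP sk).filter (fun p => pvC sk p == pvM sk)

def stepA (sk : List (List Int)) (st : Int × PySem.Dict Int Int) (oseba : Int) :
    Int × PySem.Dict Int Int :=
  if pvC sk oseba ≥ st.1 then (pvC sk oseba, st.2.insert oseba (pvC sk oseba)) else st

lemma okuzeniA_single (sk : List (List Int)) (p : Int) :
    okuzeniA sk [p] = PySem.Set.diff (pvU sk p) [p] := by
  unfold okuzeniA pvU
  simp only [List.length_cons, List.length_nil, List.foldl_cons, List.foldl_nil]
  rw [if_neg (by omega)]
  rw [show (fun (acc : List Int) (skupina : List Int) => if skupina.contains p = true then acc ++ skupina else acc) = (fun acc skupina => if (fun g : List Int => g.contains p) skupina = true then (fun (a : List Int) (g : List Int) => a ++ g) acc skupina else acc) from rfl]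
  rw [PySem.List.foldl_if_eq_foldl_filter (fun g : List Int => g.contains p) (fun a g => a ++ g) sk []]
  rw [PySem.List.foldl_append_eq_flatten]
  simp

lemma pvC_nonneg (sk : List (List Int)) (p : Int) : 0 ≤ pvC sk p := by
  unfold pvC
  simp [PySem.Set.len]

lemma foldl_update_eq (gs : List (List Int)) (s : PySem.Set Int) :
    gs.foldl (fun s g => PySem.Set.update s g) s = PySem.Set.update s gs.flatten := by
  induction gs generalizing s with
  | nil => simp [PySem.Set.update]
  | cons g gs ih => simp [List.foldl_cons, ih, PySem.Set.update_append]

lemma len_diff_single (s : PySem.Set Int) (hs : s.Nodup) (p : Int) (hp : p ∈ s) :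
    (PySem.Set.diff s [p]).length = s.length - 1 := by
  have h1 : PySem.Set.diff s [p] = s.filter (fun x => !(x == p)) := by
    show s.filter _ = _
    apply List.filter_congr
    intro x _
    by_cases h : x = p <;> simp [PySem.Set.contains, h]
  have hc : s.count p = 1 := List.count_eq_one_of_mem hs hp
  have h2 := s.length_eq_countP_add_countP (p := fun x => x == p)
  have hcount : s.countP (fun x => x == p) = s.count p := rfl
  rw [h1, ← List.countP_eq_length_filter]
  have h3 : s.countP (fun x => !(x == p)) = s.countP (fun a => decide ¬(a == p) = true) := by
    apply List.countP_congr
    intro x _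
    simp
  omega

lemma mem_pvU_self (sk : List (List Int)) (p : Int) (hp : p ∈ sk.flatten) : p ∈ pvU sk p := by
  unfold pvU
  rw [PySem.Set.mem_ofList]
  rw [List.mem_flatten] at hp ⊢
  obtain ⟨g, hg, hpg⟩ := hp
  exact ⟨g, List.mem_filter.2 ⟨hg, by simpa using hpg⟩, hpg⟩

lemma pvC_eq_len_sub_one (sk : List (List Int)) (p : Int) (hp : p ∈ sk.flatten) :
    PySem.Set.len (pvU sk p) - 1 = pvC sk p := by
  unfold pvC PySem.Set.len
  rw [len_diff_single (pvU sk p) (PySem.Set.nodup_ofList _) p (mem_pvU_self sk p hp)]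
  have : 1 ≤ (pvU sk p).length := List.length_pos_of_mem (mem_pvU_self sk p hp)
  omega

-- A's main loop, characterised: running max, max-filtered items, value bounds, attainment
lemma loopA (sk : List (List Int)) (l : List Int) (hl : l.Nodup) (mx : Int) (hmx : 0 ≤ mx)
    (d : PySem.Dict Int Int) (hfresh : ∀ p ∈ l, d.contains p = false) :
    (l.foldl (stepA sk) (mx, d)).1 = l.foldl (fun m p => max m (pvC sk p)) mx
    ∧ (∀ M, (l.foldl (stepA sk) (mx, d)).1 ≤ M →
        (l.foldl (stepA sk) (mx, d)).2.items.filter (fun kv => kv.2 == M)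
          = d.items.filter (fun kv => kv.2 == M)
            ++ (l.filter (fun p => pvC sk p == M)).map (fun p => (p, pvC sk p)))
    ∧ ((∀ kv ∈ d.items, kv.2 ≤ mx) →
        ∀ kv ∈ (l.foldl (stepA sk) (mx, d)).2.items, kv.2 ≤ (l.foldl (stepA sk) (mx, d)).1)
    ∧ ((mx = 0 ∨ ∃ kv ∈ d.items, kv.2 = mx) →
        ((l.foldl (stepA sk) (mx, d)).1 = 0
          ∨ ∃ kv ∈ (l.foldl (stepA sk) (mx, d)).2.items, kv.2 = (l.foldl (stepA sk) (mx, d)).1)) := by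
  induction l generalizing mx d with
  | nil =>
    refine ⟨rfl, by simp, fun h => by simpa using h, fun h => by simpa using h⟩
  | cons p l ih =>
    have hpl : p ∉ l := (List.nodup_cons.1 hl).1
    have hl' : l.Nodup := (List.nodup_cons.1 hl).2
    rw [List.foldl_cons, List.foldl_cons]
    by_cases hge : pvC sk p ≥ mx
    · have hstep : stepA sk (mx, d) p = (pvC sk p, d.insert p (pvC sk p)) := by
        unfold stepA; rw [if_pos hge]
      rw [hstep]
      have hfresh' : ∀ q ∈ l, (d.insert p (pvC sk p)).contains q = false := by
        intro q hq
        rw [PySem.Dict.contains_insert]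
        have hqp : q ≠ p := fun h => hpl (h ▸ hq)
        simp [hqp, hfresh q (List.mem_cons_of_mem p hq)]
      obtain ⟨ih1, ih2, ih3, ih4⟩ :=
        ih hl' (pvC sk p) (pvC_nonneg sk p) (d.insert p (pvC sk p)) hfresh'
      have hitems : (d.insert p (pvC sk p)).items = d.items ++ [(p, pvC sk p)] :=
        PySem.Dict.items_insert_of_not_contains d _ (hfresh p (List.mem_cons_self ..))
      have hmaxeq : max mx (pvC sk p) = pvC sk p := max_eq_right hge
      refine ⟨by rw [ih1, hmaxeq], ?_, ?_, ?_⟩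
      · intro M hM
        rw [ih2 M hM, hitems, List.filter_append]
        by_cases hc : pvC sk p = M
        · simp [hc, List.append_assoc]
        · simp [hc]
      · intro hvals
        apply ih3
        intro kv hkv
        rw [hitems] at hkv
        rcases List.mem_append.1 hkv with h | h
        · exact le_trans (hvals kv h) hge
        · simp only [List.mem_singleton] at h
          subst h; exact le_refl _
      · intro _
        apply ih4
        right
        exact ⟨(p, pvC sk p), by rw [hitems]; exact List.mem_append_right _ (List.mem_singleton.2 rfl), rfl⟩
    · have hstep : stepA sk (mx, d) p = (mx, d) := by
        unfold stepA; rw [if_neg hge]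
      rw [hstep]
      obtain ⟨ih1, ih2, ih3, ih4⟩ := ih hl' mx hmx d (fun q hq => hfresh q (List.mem_cons_of_mem p hq))
      have hlt : pvC sk p < mx := lt_of_not_ge hge
      have hmaxeq : max mx (pvC sk p) = mx := max_eq_left (le_of_lt hlt)
      refine ⟨by rw [ih1, hmaxeq], ?_, ih3, ih4⟩
      intro M hM
      rw [ih2 M hM]
      have hmxle : mx ≤ l.foldl (fun m q => max m (pvC sk q)) mx :=
        (PySem.List.le_foldl_max_int l (pvC sk) mx).1
      have hne : ¬ (pvC sk p = M) := by
        rw [ih1] at hM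
        omega
      simp [hne]

lemma pvP_nodup (sk : List (List Int)) : (pvP sk).Nodup := PySem.Set.nodup_ofList _

lemma mem_flatten_of_mem_pvP (sk : List (List Int)) (p : Int) (hp : p ∈ pvP sk) :
    p ∈ sk.flatten := (PySem.Set.mem_ofList _ _).1 hp

lemma pvP_ne_nil (sk : List (List Int)) (hpre : sk.flatten ≠ []) : pvP sk ≠ [] := by
  obtain ⟨x, hx⟩ := List.exists_mem_of_ne_nil _ hpre
  exact List.ne_nil_of_mem ((PySem.Set.mem_ofList sk.flatten x).2 hx)

lemma pvM_cons (sk : List (List Int)) (q : Int) (t : List Int) (h : pvP sk = q :: t) :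
    pvM sk = (t.map (pvC sk)).foldl max (pvC sk q) := by
  unfold pvM
  rw [h, List.map_cons, List.foldl_cons, max_eq_right (pvC_nonneg sk q)]

lemma A_eq (sk : List (List Int)) :
    zlati_prinasalec sk
      = (PySem.List.pyGet? (PySem.List.sorted (pvF sk) (fun x => x) false) 0).getD 0 := by
  have hsett : sk.foldl (fun s g => PySem.Set.update s g) PySem.Set.empty = pvP sk := by
    rw [foldl_update_eq]
    exact PySem.Set.update_nil_left _
  have hfun : (fun (st : Int × PySem.Dict Int Int) oseba =>
      if PySem.Set.len (okuzeniA sk [oseba]) ≥ st.1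
      then (PySem.Set.len (okuzeniA sk [oseba]), st.2.insert oseba (PySem.Set.len (okuzeniA sk [oseba])))
      else st) = stepA sk := by
    funext st o
    rw [okuzeniA_single]
    rfl
  obtain ⟨ih1, ih2, ih3, ih4⟩ := loopA sk (pvP sk) (pvP_nodup sk) 0 (le_refl 0)
      PySem.Dict.empty (fun p _ => PySem.Dict.contains_empty p)
  set r := (pvP sk).foldl (stepA sk) ((0 : Int), PySem.Dict.empty) with hr
  have h0 : zlati_prinasalec sk =
      (PySem.List.pyGet? (PySem.List.sorted
        (r.2.items.foldl (fun l kv =>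
          if kv.2 = r.2.items.foldl (fun m kv => if kv.2 ≥ m then kv.2 else m) 0
          then l ++ [kv.1] else l) [])
        (fun x => x) false) 0).getD 0 := by
    unfold zlati_prinasalec
    rw [hsett, hfun]
  rw [h0]
  have hemp : (PySem.Dict.empty : PySem.Dict Int Int).items = [] := rfl
  -- the maks loop is a running max over the values
  have hmf : (fun (m : Int) (kv : Int × Int) => if kv.2 ≥ m then kv.2 else m)
      = (fun (m : Int) (kv : Int × Int) => max m kv.2) := by
    funext m kv
    by_cases h : kv.2 ≥ m
    · rw [if_pos h, max_eq_right h]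
    · rw [if_neg h, max_eq_left (le_of_not_ge h)]
  have hmaks : r.2.items.foldl (fun m kv => if kv.2 ≥ m then kv.2 else m) 0 = r.1 := by
    rw [hmf]
    have hfm : r.2.items.foldl (fun m kv => max m kv.2) 0
        = (r.2.items.map (fun kv : Int × Int => kv.2)).foldl max 0 := by
      rw [List.foldl_map]
    rw [hfm]
    set vals := r.2.items.map (fun kv : Int × Int => kv.2) with hv
    have hvals : ∀ kv ∈ r.2.items, kv.2 ≤ r.1 := ih3 (by rw [hemp]; intro kv h; simp at h)
    have h1 : ∀ v ∈ vals, v ≤ r.1 := by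
      intro v hv'
      obtain ⟨kv, hkv, rfl⟩ := List.mem_map.1 hv'
      exact hvals kv hkv
    have h2 := PySem.List.le_foldl_max vals 0
    have h3 := PySem.List.foldl_max_mem vals 0
    have h4 : 0 ≤ r.1 := by
      rw [ih1]
      exact (PySem.List.le_foldl_max_int (pvP sk) (pvC sk) 0).1
    have h5 : r.1 = 0 ∨ r.1 ∈ vals := by
      rcases ih4 (Or.inl rfl) with h | ⟨kv, hkv, hkv2⟩
      · exact Or.inl h
      · exact Or.inr (hkv2 ▸ List.mem_map_of_mem hkv)
    apply le_antisymm
    · rcases h3 with h | h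
      · omega
      · exact h1 _ h
    · rcases h5 with h | h
      · omega
      · exact h2.2 _ h
  rw [hmaks]
  have hM : r.1 = pvM sk := by
    rw [ih1]
    unfold pvM
    rw [List.foldl_map]
  -- the najosebe loop collects the keys of maximal value
  have hnaj : r.2.items.foldl (fun l kv => if kv.2 = r.1 then l ++ [kv.1] else l) [] = pvF sk := by
    rw [PySem.List.foldl_append_ite (fun kv : Int × Int => kv.2 = r.1) (fun kv => kv.1)]
    have hdec : r.2.items.filter (fun kv => decide (kv.2 = r.1))
        = r.2.items.filter (fun kv => kv.2 == r.1) := by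
      apply List.filter_congr
      intro kv _
      by_cases h : kv.2 = r.1 <;> simp [h]
    rw [List.nil_append, hdec, ih2 r.1 (le_refl _), hemp]
    simp only [List.filter_nil, List.nil_append, List.map_map]
    unfold pvF
    rw [← hM]
    have : ((fun kv : Int × Int => kv.1) ∘ fun p => (p, pvC sk p)) = id := rfl
    rw [this, List.map_id]
  rw [hnaj]

-- B-side
def stepC (d : PySem.Dict Int (List Int)) (is : Int × PySem.Set Int) : PySem.Dict Int (List Int) :=
  is.2.foldl (fun d oseba => d.modify oseba [] (fun l => l ++ [is.1])) d

lemma union_eq_update (s t : PySem.Set Int) : PySem.Set.union s t = PySem.Set.update s t := rfl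

lemma update_ofList (s : PySem.Set Int) (xs : List Int) :
    PySem.Set.update s (PySem.Set.ofList xs) = PySem.Set.update s xs := by
  rw [PySem.Set.update_eq_append_filter s (PySem.Set.ofList xs),
      PySem.Set.update_eq_append_filter s xs, PySem.Set.ofList_ofList]

lemma filter_beq_nodup (s : List Int) (hs : s.Nodup) (c : Int) :
    s.filter (fun o => o == c) = if c ∈ s then [c] else [] := by
  rw [List.filter_beq]
  by_cases h : c ∈ s
  · rw [List.count_eq_one_of_mem hs h, if_pos h, List.replicate_one]
  · rw [List.count_eq_zero_of_not_mem h, if_neg h, List.replicate_zero]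

lemma clan_keys (l : List (Int × PySem.Set Int)) (d : PySem.Dict Int (List Int)) :
    (l.foldl stepC d).keys = PySem.Set.update d.keys (l.map (fun is => is.2)).flatten := by
  induction l generalizing d with
  | nil => simp [PySem.Set.update]
  | cons is l ih =>
    rw [List.foldl_cons, ih]
    have h : (stepC d is).keys = PySem.Set.update d.keys is.2 :=
      PySem.Dict.keys_foldl_modify is.2 [] (fun _ _ => (fun t => t ++ [is.1])) d
    rw [h, List.map_cons, List.flatten_cons, PySem.Set.update_append]

lemma clan_getD (l : List (Int × PySem.Set Int)) (hnd : ∀ is ∈ l, is.2.Nodup)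
    (d : PySem.Dict Int (List Int)) (c : Int) :
    (l.foldl stepC d).getD c []
      = d.getD c [] ++ (l.filter (fun is => is.2.contains c)).map (fun is => is.1) := by
  induction l generalizing d with
  | nil => simp
  | cons is l ih =>
    rw [List.foldl_cons, ih (fun q hq => hnd q (List.mem_cons_of_mem _ hq))]
    have hstep : (stepC d is).getD c [] = d.getD c [] ++ (if c ∈ is.2 then [is.1] else []) := by
      unfold stepC
      have hshape : is.2.foldl (fun d oseba => d.modify oseba [] (fun l => l ++ [is.1])) d
          = (is.2.map (fun o => (o, is.1))).foldl (fun d p => d.modify p.1 [] (fun l => l ++ [p.2])) d := by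
        rw [List.foldl_map]
      rw [hshape, PySem.Dict.getD_foldl_modify_append]
      congr 1
      rw [List.filter_map]
      have : ((fun p : Int × Int => p.1 == c) ∘ fun o => (o, is.1)) = (fun o => o == c) := rfl
      rw [this, filter_beq_nodup is.2 (hnd is (List.mem_cons_self ..)) c]
      by_cases h : c ∈ is.2 <;> simp [h]
    rw [hstep, List.filter_cons]
    by_cases h : c ∈ is.2
    · have hc : is.2.contains c = true := by simpa [PySem.Set.contains_iff] using h
      rw [if_pos h, hc]
      simp [List.append_assoc]
    · have hc : is.2.contains c = false := by
        rw [Bool.eq_false_iff]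
        intro hcc
        exact h ((PySem.Set.contains_iff _ _).1 hcc)
      rw [if_neg h, hc]
      simp

lemma map_snd_filter_enumerate (xs : List (PySem.Set Int)) (q : PySem.Set Int → Bool) (s : Int) :
    ((PySem.List.enumerate xs s).filter (fun is => q is.2)).map (fun is => is.2)
      = xs.filter q := by
  induction xs generalizing s with
  | nil => simp [PySem.List.enumerate_nil]
  | cons x xs ih =>
    rw [PySem.List.enumerate_cons, List.filter_cons, List.filter_cons]
    by_cases h : q x
    · simp only [h, if_pos]
      rw [List.map_cons, ih (s + 1)]
    · simp only [h]
      rw [if_neg (by simp), if_neg (by simp), ih (s + 1)]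

lemma get_enumerate (xs : List (PySem.Set Int)) :
    ∀ is ∈ PySem.List.enumerate xs 0, (PySem.List.pyGet? xs is.1).getD PySem.Set.empty = is.2 := by
  intro is his
  obtain ⟨k, hk, rfl⟩ := (PySem.List.mem_enumerate_iff ..).1 his
  have : PySem.List.pyGet? xs ((0 : Int) + (k : Int)) = xs[k]? := by
    rw [zero_add, PySem.List.pyGet?_natCast]
  rw [this, List.getElem?_eq_getElem hk]
  rfl

lemma union_fold_eq_pvU (sk : List (List Int)) (p : Int) :
    ((((PySem.List.enumerate (sk.map (fun g => PySem.Set.ofList g)) 0).filter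
          (fun is => is.2.contains p)).map (fun is => is.1)).foldl
        (fun acc i => PySem.Set.union acc
          ((PySem.List.pyGet? (sk.map (fun g => PySem.Set.ofList g)) i).getD PySem.Set.empty))
        PySem.Set.empty)
      = pvU sk p := by
  set sets := sk.map (fun g => PySem.Set.ofList g) with hsets
  rw [List.foldl_map]
  have hcongr : ((PySem.List.enumerate sets 0).filter (fun is => is.2.contains p)).foldl
        (fun acc is => PySem.Set.union acc ((PySem.List.pyGet? sets is.1).getD PySem.Set.empty))
        PySem.Set.empty
      = ((PySem.List.enumerate sets 0).filter (fun is => is.2.contains p)).foldl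
        (fun acc is => PySem.Set.union acc is.2) PySem.Set.empty := by
    apply PySem.List.foldl_congr_mem
    intro acc is hmem
    rw [get_enumerate sets is (List.mem_of_mem_filter hmem)]
  rw [hcongr]
  have hshape : ((PySem.List.enumerate sets 0).filter (fun is => is.2.contains p)).foldl
        (fun acc is => PySem.Set.union acc is.2) PySem.Set.empty
      = (((PySem.List.enumerate sets 0).filter (fun is => is.2.contains p)).map
          (fun is => is.2)).foldl (fun acc t => PySem.Set.union acc t) PySem.Set.empty := by
    rw [List.foldl_map]
  rw [hshape, map_snd_filter_enumerate sets (fun t => t.contains p) 0, hsets]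
  rw [List.filter_map]
  have hpred : ((fun t : PySem.Set Int => t.contains p) ∘ fun g => PySem.Set.ofList g)
      = (fun g : List Int => g.contains p) := by
    funext g
    by_cases h : p ∈ g
    · have h1 : (PySem.Set.ofList g).contains p = true := by
        rw [PySem.Set.contains_iff, PySem.Set.mem_ofList]; exact h
      have h2 : g.contains p = true := by simpa using h
      simp only [Function.comp_apply, h1, h2]
    · have h1 : (PySem.Set.ofList g).contains p = false := by
        rw [Bool.eq_false_iff]
        intro hc
        exact h ((PySem.Set.mem_ofList g p).1 ((PySem.Set.contains_iff _ _).1 hc))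
      have h2 : g.contains p = false := by simpa using h
      simp only [Function.comp_apply, h1, h2]
  rw [hpred, List.foldl_map]
  have hupd : (sk.filter (fun g => g.contains p)).foldl
        (fun acc g => PySem.Set.union acc (PySem.Set.ofList g)) PySem.Set.empty
      = (sk.filter (fun g => g.contains p)).foldl
        (fun acc g => PySem.Set.update acc g) PySem.Set.empty := by
    apply PySem.List.foldl_congr_mem
    intro acc g _
    rw [union_eq_update, update_ofList]
  rw [hupd, foldl_update_eq]
  exact PySem.Set.update_nil_left _

lemma filterMap_if_eq_filter (l : List Int) (f : Int → Int) (M : Int) :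
    l.filterMap (fun p => if f p = M then some p else none)
      = l.filter (fun p => f p == M) := by
  induction l with
  | nil => simp
  | cons p t ih =>
    rw [List.filterMap_cons, List.filter_cons]
    by_cases h : f p = M
    · rw [if_pos h, if_pos (by simp [h]), ih]
    · rw [if_neg h, if_neg (by simp [h]), ih]

lemma nodup_snd_enumerate_sets (sk : List (List Int)) :
    ∀ is ∈ PySem.List.enumerate (sk.map (fun g => PySem.Set.ofList g)) 0, is.2.Nodup := by
  intro is his
  obtain ⟨k, hk, rfl⟩ := (PySem.List.mem_enumerate_iff ..).1 his
  simp only [List.getElem_map]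
  exact PySem.Set.nodup_ofList _

lemma update_flatten_map (s : PySem.Set Int) (sk : List (List Int)) :
    PySem.Set.update s ((sk.map (fun g => PySem.Set.ofList g)).flatten)
      = PySem.Set.update s sk.flatten := by
  induction sk generalizing s with
  | nil => rfl
  | cons g t ih =>
    rw [List.map_cons, List.flatten_cons, List.flatten_cons, PySem.Set.update_append,
        PySem.Set.update_append, update_ofList]
    exact ih _

lemma B_eq (sk : List (List Int)) (hpre : sk.flatten ≠ []) :
    zlati_prinasalec_alt sk = (PySem.List.min? (pvF sk) (fun v => v)).getD 0 := by
  set sets := sk.map (fun g => PySem.Set.ofList g) with hsets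
  set clan := (PySem.List.enumerate sets 0).foldl stepC PySem.Dict.empty with hclan
  set vfun := fun idxs : List Int => PySem.Set.len (idxs.foldl (fun acc i =>
      PySem.Set.union acc ((PySem.List.pyGet? sets i).getD PySem.Set.empty)) PySem.Set.empty) - 1
    with hvfun
  set stev := clan.items.foldl (fun d kv => d.insert kv.1 (vfun kv.2)) PySem.Dict.empty with hstev
  have h0 : zlati_prinasalec_alt sk =
      (PySem.List.min? (stev.items.filterMap (fun kv : Int × Int =>
          if kv.2 = (PySem.List.max? stev.values (fun v => v)).getD 0 then some kv.1 else none))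
        (fun v => v)).getD 0 := rfl
  rw [h0]
  -- clanstvo: keys are the persons, values the indices of the containing groups
  have hkeys : clan.keys = pvP sk := by
    rw [hclan, clan_keys]
    have h1 : (PySem.Dict.empty : PySem.Dict Int (List Int)).keys = [] := rfl
    rw [h1, PySem.List.map_snd_enumerate, hsets]
    show PySem.Set.update [] (sk.map (fun g => PySem.Set.ofList g)).flatten = pvP sk
    rw [update_flatten_map, PySem.Set.update_nil_left]
    rfl
  have hnd : clan.keys.Nodup := by rw [hkeys]; exact pvP_nodup sk
  have hgetD : ∀ p, clan.getD p []
      = ((PySem.List.enumerate sets 0).filter (fun is => is.2.contains p)).map (fun is => is.1) := by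
    intro p
    rw [hclan, clan_getD _ (nodup_snd_enumerate_sets sk) PySem.Dict.empty p]
    rfl
  have hval : ∀ p ∈ pvP sk, vfun (clan.getD p []) = pvC sk p := by
    intro p hp
    rw [hgetD p, hvfun]
    show PySem.Set.len _ - 1 = pvC sk p
    rw [union_fold_eq_pvU sk p]
    exact pvC_eq_len_sub_one sk p (mem_flatten_of_mem_pvP sk p hp)
  have hitems0 : clan.items = (pvP sk).map (fun p => (p, clan.getD p [])) := by
    rw [PySem.Dict.items_eq_map_keys clan hnd [], hkeys]
  -- stevila: one entry per person, holding its infection count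
  have hstevitems : stev.items = (pvP sk).map (fun p => (p, pvC sk p)) := by
    rw [hstev]
    have hfresh : ∀ kv ∈ clan.items, (PySem.Dict.empty : PySem.Dict Int Int).contains kv.1 = false :=
      fun kv _ => PySem.Dict.contains_empty kv.1
    have hknd : (clan.items.map (fun kv => kv.1)).Nodup := by
      have : clan.items.map (fun kv => kv.1) = clan.keys := rfl
      rw [this]; exact hnd
    rw [PySem.Dict.items_foldl_insert_fresh clan.items (fun kv => kv.1) (fun kv => vfun kv.2)
        PySem.Dict.empty hfresh hknd]
    have hemp : (PySem.Dict.empty : PySem.Dict Int Int).items = [] := rfl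
    rw [hemp, List.nil_append, hitems0, List.map_map]
    apply List.map_congr_left
    intro p hp
    show (p, vfun (clan.getD p [])) = (p, pvC sk p)
    rw [hval p hp]
  have hstevvals : stev.values = (pvP sk).map (pvC sk) := by
    have h1 : stev.values = stev.items.map (fun kv => kv.2) := rfl
    rw [h1, hstevitems, List.map_map]
    rfl
  obtain ⟨q, t, hP⟩ := List.exists_cons_of_ne_nil (pvP_ne_nil sk hpre)
  have hmax : (PySem.List.max? ((pvP sk).map (pvC sk)) (fun v => v)).getD 0 = pvM sk := by
    rw [hP, List.map_cons, PySem.List.max?_id_cons, Option.getD_some, pvM_cons sk q t hP]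
  rw [hstevvals, hmax, hstevitems, List.filterMap_map]
  have hcomp : ((fun kv : Int × Int => if kv.2 = pvM sk then some kv.1 else none)
      ∘ fun p => (p, pvC sk p)) = (fun p => if pvC sk p = pvM sk then some p else none) := rfl
  rw [hcomp, filterMap_if_eq_filter (pvP sk) (pvC sk) (pvM sk)]
  rfl

lemma pvF_ne_nil (sk : List (List Int)) (hpre : sk.flatten ≠ []) : pvF sk ≠ [] := by
  obtain ⟨q, t, hP⟩ := List.exists_cons_of_ne_nil (pvP_ne_nil sk hpre)
  have hM := pvM_cons sk q t hP
  have hmem : ∃ p ∈ pvP sk, pvC sk p = pvM sk := by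
    rcases PySem.List.foldl_max_mem (t.map (pvC sk)) (pvC sk q) with h | h
    · exact ⟨q, by rw [hP]; exact List.mem_cons_self .., by rw [hM, h]⟩
    · rw [← hM] at h
      obtain ⟨p, hp, hpc⟩ := List.mem_map.1 h
      exact ⟨p, by rw [hP]; exact List.mem_cons_of_mem _ hp, hpc⟩
  obtain ⟨p, hp, hpc⟩ := hmem
  apply List.ne_nil_of_mem (a := p)
  unfold pvF
  exact List.mem_filter.2 ⟨hp, by simp [hpc]⟩


lemma head_sorted_eq_min (F : List Int) (hF : F ≠ []) :
    (PySem.List.pyGet? (PySem.List.sorted F (fun x => x) false) 0).getD 0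
      = (PySem.List.min? F (fun v => v)).getD 0 := by
  obtain ⟨m, hm⟩ : ∃ m, PySem.List.min? F (fun v => v) = some m := by
    cases h : PySem.List.min? F (fun v => v) with
    | none => exact absurd ((PySem.List.min?_eq_none_iff F _).1 h) hF
    | some m => exact ⟨m, rfl⟩
  have hsne : PySem.List.sorted F (fun x => x) false ≠ [] := by
    intro h
    exact hF ((PySem.List.sorted_eq_nil_iff F _ false).1 h)
  obtain ⟨h, t, hht⟩ := List.exists_cons_of_ne_nil hsne
  have hhead : ∀ y ∈ F, h ≤ y := PySem.List.key_head_sorted_le F (fun x => x) hht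
  have hmem : h ∈ F := by
    have hx : h ∈ PySem.List.sorted F (fun x => x) false := by rw [hht]; exact List.mem_cons_self ..
    exact (PySem.List.mem_sorted F (fun x => x) false h).1 hx
  have h1 : m ≤ h := PySem.List.min?_isMin hm h hmem
  have h2 : h ≤ m := hhead m (PySem.List.min?_mem hm)
  rw [hht, hm]
  simp [PySem.List.pyGet?, PySem.List.pyIdx?]
  omega

-- ===== VERDICT (by name: the statement is the Claim_ definition above) =====
theorem zlati_prinasalec_spec : Claim_equal_zlati_prinasalec := by
  intro sk _hdom hpre
  unfold Spec_zlati_prinasalec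
  rw [A_eq sk, B_eq sk hpre, head_sorted_eq_min _ (pvF_ne_nil sk hpre)]
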